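-- pv_equiv track=rewrite | github.com/Lisandro-Loker/Algoritmo2025 | Recursividad/ejercicio22.py | usar_la_fuerza
-- ===== SOURCE A (Python) =====
-- def usar_la_fuerza(mochila, contador=0):
--     if not mochila:
--         return False, contador
--     objeto = mochila[0]
--     if objeto == "sable de luz":
--         return True, contador + 1
--     else:
--         return usar_la_fuerza(mochila[1:], contador + 1)
-- ===== SOURCE B (Python) =====
-- def usar_la_fuerza(mochila, contador=0):
--     for i, objeto in enumerate(mochila):
--         if objeto == "sable de luz":
--             return True, contador + i + 1
--     return False, contador + len(mochila)
-- ===== Notes on version B (the rewrite author's own statement) =====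
-- stated objective: simpler
-- what changed: Replaces the slicing recursion (which copies the tail at every step) with a single enumerate loop that returns contador+i+1 at the first match and contador+len(mochila) after the loop.
import Mathlib
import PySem

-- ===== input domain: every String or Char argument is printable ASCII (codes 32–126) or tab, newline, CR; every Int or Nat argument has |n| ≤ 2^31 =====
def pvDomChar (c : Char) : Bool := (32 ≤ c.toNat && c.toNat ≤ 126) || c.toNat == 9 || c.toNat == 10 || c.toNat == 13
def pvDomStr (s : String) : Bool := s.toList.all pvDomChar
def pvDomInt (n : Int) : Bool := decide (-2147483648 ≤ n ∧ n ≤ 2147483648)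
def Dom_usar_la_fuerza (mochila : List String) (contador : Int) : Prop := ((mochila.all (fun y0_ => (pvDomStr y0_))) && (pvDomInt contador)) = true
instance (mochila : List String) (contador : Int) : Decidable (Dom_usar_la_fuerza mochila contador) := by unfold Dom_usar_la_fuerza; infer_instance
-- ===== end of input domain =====

-- ===== PORT A =====
-- B replaces A's slicing recursion by a single enumerate loop; same return value everywhere.
def usar_la_fuerza (mochila : List String) (contador : Int) : Bool × Int :=
  match mochila with
  | [] => (false, contador)
  | objeto :: rest =>
    if objeto == "sable de luz" then (true, contador + 1)
    else usar_la_fuerza rest (contador + 1)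

-- ===== PORT B =====
def usar_la_fuerza_alt (mochila : List String) (contador : Int) : Bool × Int :=
  match (PySem.List.enumerate mochila).find? (fun p => p.2 == "sable de luz") with
  | some (i, _) => (true, contador + i + 1)
  | none => (false, contador + mochila.length)

-- ===== PRECONDITION & SPEC =====
def Spec_usar_la_fuerza (mochila : List String) (contador : Int) (out : Bool × Int) : Prop := out = usar_la_fuerza_alt mochila contador
instance (mochila : List String) (contador : Int) (out : Bool × Int) : Decidable (Spec_usar_la_fuerza mochila contador out) := by unfold Spec_usar_la_fuerza; infer_instance

-- ===== CLAIM (what is proved, stated in full; the proofs are below) =====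
def Claim_equal_usar_la_fuerza : Prop := ∀ (mochila : List String) (contador : Int), Dom_usar_la_fuerza mochila contador → Spec_usar_la_fuerza mochila contador (usar_la_fuerza mochila contador)

-- ===== LEMMAS AND PROOFS =====

-- ===== VERDICT (by name: the statement is the Claim_ definition above) =====
lemma fuerza_agree (mochila : List String) (s contador : Int) :
    usar_la_fuerza mochila contador =
      (match (PySem.List.enumerate mochila s).find? (fun p => p.2 == "sable de luz") with
       | some (i, _) => (true, contador + (i - s) + 1)
       | none => (false, contador + mochila.length)) := by
  induction mochila generalizing s contador with
  | nil => simp [usar_la_fuerza, PySem.List.enumerate_nil]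
  | cons x xs ih =>
    rw [PySem.List.enumerate_cons]
    by_cases hx : x = "sable de luz"
    · simp [usar_la_fuerza, hx, List.find?]
    · have hb : (x == "sable de luz") = false := by simp [hx]
      simp only [usar_la_fuerza, List.find?, hb, Bool.false_eq_true, if_false]
      rw [ih (s + 1) (contador + 1)]
      cases hfind : (PySem.List.enumerate xs (s + 1)).find? (fun p => p.2 == "sable de luz") with
      | none => simp; omega
      | some p =>
        obtain ⟨i, y⟩ := p
        simp
        omega

theorem usar_la_fuerza_spec : Claim_equal_usar_la_fuerza := by
  intro mochila contador _
  unfold Spec_usar_la_fuerza usar_la_fuerza_alt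
  rw [fuerza_agree mochila 0 contador]
  cases (PySem.List.enumerate mochila 0).find? (fun p => p.2 == "sable de luz") with
  | none => simp
  | some p =>
    obtain ⟨i, y⟩ := p
    simp
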